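-- pv_equiv track=rewrite | github.com/octuplivia247/AgentBeats | src/green_agent/core/smart_home_env_manager.py | _normalize_device_name
-- ===== SOURCE A (Python) =====
-- def _normalize_device_name(device_name: str) -> str:
--     """
--     Normalize device name to room.device format.
--
--     Handles:
--     - living_room_light -> living_room.light
--     - living_room.light -> living_room.light (unchanged)
--     - master_bedroom_air_conditioner -> master_bedroom.air_conditioner
--     """
--     if "." in device_name:
--         return device_name
--
--     # Known device types to look for at the end
--     device_types = [
--         "light", "air_conditioner", "heating", "fan", "garage_door",
--         "blinds", "curtain", "air_purifiers", "water_heater",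
--         "media_player", "vacuum_robot", "aromatherapy", "trash",
--         "humidifier", "dehumidifiers", "pet_feeder", "thermostat"
--     ]
--
--     # Try to find a device type suffix
--     for dt in device_types:
--         suffix = f"_{dt}"
--         if device_name.endswith(suffix):
--             room_part = device_name[:-len(suffix)]
--             return f"{room_part}.{dt}"
--
--     # Fallback: replace last underscore with dot
--     if "_" in device_name:
--         last_underscore = device_name.rfind("_")
--         return device_name[:last_underscore] + "." + device_name[last_underscore + 1:]
--
--     return device_name
-- ===== SOURCE B (Python) =====
-- _DEVICE_TYPES = {
--     "light", "air_conditioner", "heating", "fan", "garage_door",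
--     "blinds", "curtain", "air_purifiers", "water_heater",
--     "media_player", "vacuum_robot", "aromatherapy", "trash",
--     "humidifier", "dehumidifiers", "pet_feeder", "thermostat",
-- }
--
--
-- def _normalize_device_name(device_name: str) -> str:
--     if "." in device_name:
--         return device_name
--     # Work from the right: no known device type contains more than one
--     # underscore, so only the last one or two underscore-separated tokens
--     # can form a known device type.
--     head, sep, tail = device_name.rpartition("_")
--     if not sep:
--         return device_name
--     if tail in _DEVICE_TYPES:
--         return head + "." + tail
--     head2, sep2, tail2 = head.rpartition("_")
--     if sep2 and tail2 + "_" + tail in _DEVICE_TYPES: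
--         return head2 + "." + tail2 + "_" + tail
--     # unknown tail: still split at the last underscore
--     return head + "." + tail
-- ===== Notes on version B (the rewrite author's own statement) =====
-- stated objective: alternative
-- what changed: B splits the name from the right with str.rpartition on the underscore and checks the last one or two underscore-separated tokens against a set (valid because no known device type contains more than one internal underscore), instead of A's endswith pass per device type; the fallback split merges into the same rpartition result.
import Mathlib
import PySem

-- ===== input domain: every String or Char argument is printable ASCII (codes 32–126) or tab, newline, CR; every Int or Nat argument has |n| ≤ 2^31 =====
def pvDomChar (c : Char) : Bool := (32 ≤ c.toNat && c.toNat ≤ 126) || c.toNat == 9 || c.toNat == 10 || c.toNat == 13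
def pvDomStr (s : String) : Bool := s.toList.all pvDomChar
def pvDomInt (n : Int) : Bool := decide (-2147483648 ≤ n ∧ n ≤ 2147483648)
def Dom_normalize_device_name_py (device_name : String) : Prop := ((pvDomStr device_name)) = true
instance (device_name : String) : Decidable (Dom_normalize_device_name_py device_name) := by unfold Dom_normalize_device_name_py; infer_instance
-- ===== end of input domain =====

-- B works from the right with str.rpartition: no known device type has more than one
-- underscore, so only the last one or two '_'-separated tokens can match; A instead runs an
-- endswith pass per device type (objective: alternative).

-- ===== PORT A =====
def pvDeviceTypesA : List (List Char) :=
  ["light".toList, "air_conditioner".toList, "heating".toList, "fan".toList,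
   "garage_door".toList, "blinds".toList, "curtain".toList, "air_purifiers".toList,
   "water_heater".toList, "media_player".toList, "vacuum_robot".toList,
   "aromatherapy".toList, "trash".toList, "humidifier".toList, "dehumidifiers".toList,
   "pet_feeder".toList, "thermostat".toList]

-- A's for-loop: first dt in device_types with device_name.endswith("_" + dt)
def pvAScan (name : List Char) : List (List Char) → Option (List Char)
  | [] => none
  | dt :: rest =>
      if PySem.Chars.endswith name ('_' :: dt) then some dt else pvAScan name rest

def normalize_device_name_py (device_name : String) : String :=
  let cs := device_name.toList
  if PySem.Chars.isIn ['.'] cs then device_name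
  else
    match pvAScan cs pvDeviceTypesA with
    | some dt =>
        -- room_part = device_name[:-len(suffix)]; return f"{room_part}.{dt}"
        String.ofList (PySem.List.slice cs none (some (-((('_' :: dt).length : Nat) : Int))) ++ '.' :: dt)
    | none =>
        if PySem.Chars.isIn ['_'] cs then
          let lu := PySem.Chars.rfind cs ['_']
          String.ofList (PySem.List.slice cs none (some lu) ++ '.' :: PySem.List.slice cs (some (lu + 1)) none)
        else device_name

-- ===== PORT B =====
def pvDeviceTypeSet : PySem.Set (List Char) :=
  PySem.Set.ofList
    ["light".toList, "air_conditioner".toList, "heating".toList, "fan".toList,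
     "garage_door".toList, "blinds".toList, "curtain".toList, "air_purifiers".toList,
     "water_heater".toList, "media_player".toList, "vacuum_robot".toList,
     "aromatherapy".toList, "trash".toList, "humidifier".toList, "dehumidifiers".toList,
     "pet_feeder".toList, "thermostat".toList]

-- hand port of str.rpartition on the underscore separator (exact: none = separator absent;
-- otherwise the piece before the last separator and the piece after it)
def pvRPart : List Char → Option (List Char × List Char)
  | [] => none
  | c :: cs =>
      match pvRPart cs with
      | some (h, t) => some (c :: h, t)
      | none => if c = '_' then some ([], cs) else none

def normalize_device_name_py_alt (device_name : String) : String :=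
  let cs := device_name.toList
  if PySem.Chars.isIn ['.'] cs then device_name
  else
    match pvRPart cs with
    | none => device_name
    | some (head, tail) =>
        if PySem.Set.contains pvDeviceTypeSet tail then
          String.ofList (head ++ '.' :: tail)
        else
          match pvRPart head with
          | some (head2, tail2) =>
              if PySem.Set.contains pvDeviceTypeSet (tail2 ++ '_' :: tail) then
                String.ofList (head2 ++ '.' :: tail2 ++ '_' :: tail)
              else String.ofList (head ++ '.' :: tail)
          | none => String.ofList (head ++ '.' :: tail)

-- ===== PRECONDITION & SPEC =====
def Spec_normalize_device_name_py (device_name : String) (out : String) : Prop := out = normalize_device_name_py_alt device_name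
instance (device_name : String) (out : String) : Decidable (Spec_normalize_device_name_py device_name out) := by unfold Spec_normalize_device_name_py; infer_instance

-- ===== CLAIM (what is proved, stated in full; the proofs are below) =====
def Claim_equal_normalize_device_name_py : Prop := ∀ (device_name : String), Dom_normalize_device_name_py device_name → Spec_normalize_device_name_py device_name (normalize_device_name_py device_name)

-- ===== LEMMAS AND PROOFS =====

-- no device type extends another: "_d1" is a suffix of "_d2" only for d1 = d2
theorem pvNoNest : ∀ d1 ∈ pvDeviceTypesA, ∀ d2 ∈ pvDeviceTypesA,
    ('_' :: d1) <:+ ('_' :: d2) → d1 = d2 := by decide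

-- each device type contains at most one underscore
theorem pvTypeShape : ∀ dt ∈ pvDeviceTypesA,
    (match pvRPart dt with
     | none => true
     | some (d1, _) => decide ('_' ∉ d1)) = true := by decide

theorem pvMemSetIff (d : List Char) :
    PySem.Set.contains pvDeviceTypeSet d = true ↔ d ∈ pvDeviceTypesA := by
  rw [PySem.Set.contains_iff]
  exact PySem.Set.mem_ofList _ d

theorem pvAScan_some {name : List Char} {ts : List (List Char)} {dt : List Char}
    (h : pvAScan name ts = some dt) : dt ∈ ts ∧ ('_' :: dt) <:+ name := by
  induction ts with
  | nil => simp [pvAScan] at h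
  | cons t rest ih =>
    by_cases he : PySem.Chars.endswith name ('_' :: t) = true
    · simp [pvAScan, he] at h
      subst h
      exact ⟨List.mem_cons_self, (PySem.Chars.endswith_iff _ _).mp he⟩
    · simp [pvAScan, he] at h
      obtain ⟨h1, h2⟩ := ih h
      exact ⟨List.mem_cons_of_mem _ h1, h2⟩

theorem pvAScan_isSome {name : List Char} {ts : List (List Char)} {dt : List Char}
    (hmem : dt ∈ ts) (hsuf : ('_' :: dt) <:+ name) : (pvAScan name ts).isSome := by
  induction ts with
  | nil => simp at hmem
  | cons t rest ih =>
    by_cases he : PySem.Chars.endswith name ('_' :: t) = true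
    · simp [pvAScan, he]
    · rcases List.mem_cons.mp hmem with hdt | hdt
      · subst hdt
        exact absurd ((PySem.Chars.endswith_iff _ _).mpr hsuf) he
      · simpa [pvAScan, he] using ih hdt

-- at most one split: two matching suffixes coincide
theorem pvUnique {cs d1 d2 : List Char} (h1 : d1 ∈ pvDeviceTypesA) (h2 : d2 ∈ pvDeviceTypesA)
    (s1 : ('_' :: d1) <:+ cs) (s2 : ('_' :: d2) <:+ cs) : d1 = d2 := by
  rcases List.suffix_or_suffix_of_suffix s1 s2 with h | h
  · exact pvNoNest d1 h1 d2 h2 h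
  · exact (pvNoNest d2 h2 d1 h1 h).symm

-- rpartition characterisation
theorem pvRPart_none_iff : ∀ (cs : List Char), pvRPart cs = none ↔ '_' ∉ cs := by
  intro cs
  induction cs with
  | nil => simp [pvRPart]
  | cons c cs ih =>
    constructor
    · intro h hm
      rw [pvRPart] at h
      cases hr : pvRPart cs with
      | some p => obtain ⟨a, b⟩ := p; rw [hr] at h; simp at h
      | none =>
        rw [hr] at h
        by_cases hc : c = '_'
        · rw [if_pos hc] at h; simp at h
        · rcases List.mem_cons.mp hm with he | hm2
          · exact hc he.symm
          · exact (ih.mp hr) hm2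
    · intro hm
      have hc : ¬ c = '_' := fun e => hm (by simp [e])
      have hcs : '_' ∉ cs := fun m => hm (List.mem_cons_of_mem _ m)
      rw [pvRPart, ih.mpr hcs, if_neg hc]

theorem pvRPart_some : ∀ (cs h t : List Char), pvRPart cs = some (h, t) →
    cs = h ++ '_' :: t ∧ '_' ∉ t := by
  intro cs
  induction cs with
  | nil => intro h t hp; simp [pvRPart] at hp
  | cons c cs ih =>
    intro h t hp
    cases hr : pvRPart cs with
    | some p =>
      obtain ⟨h', t'⟩ := p
      rw [pvRPart, hr] at hp
      simp only [Option.some.injEq, Prod.mk.injEq] at hp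
      obtain ⟨rfl, rfl⟩ := hp
      obtain ⟨hcs, hnt⟩ := ih h' t' hr
      exact ⟨by simp [hcs], hnt⟩
    | none =>
      rw [pvRPart, hr] at hp
      by_cases hc : c = '_'
      · rw [if_pos hc] at hp
        simp only [Option.some.injEq, Prod.mk.injEq] at hp
        obtain ⟨rfl, rfl⟩ := hp
        exact ⟨by simp [hc], (pvRPart_none_iff cs).mp hr⟩
      · rw [if_neg hc] at hp; exact absurd hp (by simp)

theorem pvRPart_mk : ∀ (h t : List Char), '_' ∉ t → pvRPart (h ++ '_' :: t) = some (h, t) := by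
  intro h
  induction h with
  | nil =>
    intro t ht
    simp [pvRPart, (pvRPart_none_iff t).mpr ht]
  | cons c h ih =>
    intro t ht
    simp only [List.cons_append, pvRPart, ih t ht]

-- ['_'] is never a prefix of a drop of an underscore-free list
theorem pvNoPrefixDrop {t : List Char} (ht : '_' ∉ t) (d : Nat) :
    ['_'].isPrefixOf (t.drop d) = false := by
  by_contra h
  rw [Bool.not_eq_false, List.isPrefixOf_iff_prefix] at h
  obtain ⟨r, hr⟩ := h
  exact ht (List.mem_of_mem_drop (by rw [← hr]; simp))

theorem pvRfindGo (s : List Char) (k : Nat)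
    (hk : ['_'].isPrefixOf (s.drop k) = true) :
    ∀ n, k ≤ n → (∀ j, k < j → j ≤ n → ['_'].isPrefixOf (s.drop j) = false) →
    PySem.Chars.rfind.go s ['_'] n = (k : Int) := by
  intro n
  induction n with
  | zero =>
    intro hkn _
    interval_cases k
    rw [PySem.Chars.rfind.go]
    simp only [List.drop_zero] at hk
    rw [if_pos hk]
    simp
  | succ j ih =>
    intro hkn hno
    rw [PySem.Chars.rfind.go]
    by_cases hkj : k = j + 1
    · subst hkj
      rw [if_pos hk]
    · have hklt : k ≤ j := by omega
      rw [if_neg (by simp [hno (j+1) (by omega) (by omega)])]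
      exact ih hklt fun i h1 h2 => hno i h1 (by omega)

theorem pvRfindEq (h t : List Char) (ht : '_' ∉ t) :
    PySem.Chars.rfind (h ++ '_' :: t) ['_'] = (h.length : Int) := by
  unfold PySem.Chars.rfind
  apply pvRfindGo
  · rw [List.drop_left' rfl]
    simp [List.isPrefixOf]
  · simp
  · intro j h1 h2
    have hdrop : (h ++ '_' :: t).drop j = t.drop (j - h.length - 1) := by
      obtain ⟨m, hm⟩ : ∃ m, j - h.length = m + 1 := ⟨j - h.length - 1, by omega⟩
      rw [List.drop_append, List.drop_eq_nil_of_le (le_of_lt h1), List.nil_append, hm,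
        List.drop_succ_cons]
      simp
    rw [hdrop]
    exact pvNoPrefixDrop ht _

-- A's scan at pre ++ "_" ++ dt with dt a known type returns exactly dt
theorem pvAScan_eq (pre dt : List Char) (hmem : dt ∈ pvDeviceTypesA) :
    pvAScan (pre ++ '_' :: dt) pvDeviceTypesA = some dt := by
  cases hA : pvAScan (pre ++ '_' :: dt) pvDeviceTypesA with
  | none =>
    have := pvAScan_isSome hmem (⟨pre, rfl⟩ : ('_' :: dt) <:+ (pre ++ '_' :: dt))
    rw [hA] at this
    simp at this
  | some d =>
    obtain ⟨hm, hs⟩ := pvAScan_some hA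
    rw [pvUnique hm hmem hs ⟨pre, rfl⟩]

-- A's room slice: (pre ++ "_" ++ dt)[:-len("_" ++ dt)] = pre
theorem pvASliceEq (pre dt : List Char) :
    PySem.List.slice (pre ++ '_' :: dt) none (some (-((('_' :: dt).length : Nat) : Int))) = pre := by
  rw [PySem.List.slice_to_neg_natCast _ _ (by simp)]
  have hlen : (pre ++ '_' :: dt).length - ('_' :: dt).length = pre.length := by simp
  rw [hlen, List.take_left' rfl]

-- A's rfind fallback at h ++ "_" ++ t with t underscore-free gives h ++ "." ++ t
theorem pvFallback (h t : List Char) (hnt : '_' ∉ t) :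
    (if PySem.Chars.isIn ['_'] (h ++ '_' :: t) then
       String.ofList (PySem.List.slice (h ++ '_' :: t) none
           (some (PySem.Chars.rfind (h ++ '_' :: t) ['_'])) ++
         '.' :: PySem.List.slice (h ++ '_' :: t)
           (some (PySem.Chars.rfind (h ++ '_' :: t) ['_'] + 1)) none)
     else String.ofList (h ++ '_' :: t)) = String.ofList (h ++ '.' :: t) := by
  have hin : PySem.Chars.isIn ['_'] (h ++ '_' :: t) = true := by
    rw [PySem.Chars.isIn_iff_infix]
    exact ⟨h, t, by simp⟩
  rw [if_pos hin]
  simp only [pvRfindEq h t hnt]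
  have h1 : PySem.List.slice (h ++ '_' :: t) none (some ((h.length : Nat) : Int)) = h := by
    rw [PySem.List.slice_to _ (by positivity)]
    simp [List.take_left' rfl]
  have h2 : PySem.List.slice (h ++ '_' :: t) (some (((h.length : Nat) : Int) + 1)) none = t := by
    rw [PySem.List.slice_from _ (by positivity)]
    have : (((h.length : Nat) : Int) + 1).toNat = h.length + 1 := by omega
    rw [this]
    have hsplit : h ++ '_' :: t = (h ++ ['_']) ++ t := by simp
    rw [hsplit, List.drop_left' (by simp)]
  rw [h1, h2]

-- rpartition is determined by any decomposition with an underscore-free tail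
theorem pvRPartCancel {pre dt h t : List Char} (hnd : '_' ∉ dt) (hnt : '_' ∉ t)
    (he : pre ++ '_' :: dt = h ++ '_' :: t) : pre = h ∧ dt = t := by
  have h1 := pvRPart_mk pre dt hnd
  rw [he, pvRPart_mk h t hnt] at h1
  simp only [Option.some.injEq, Prod.mk.injEq] at h1
  exact ⟨h1.1.symm, h1.2.symm⟩

-- main equality of the two bodies past the '.' check
theorem pvMain (cs : List Char) :
    (match pvAScan cs pvDeviceTypesA with
     | some dt =>
         String.ofList (PySem.List.slice cs none (some (-((('_' :: dt).length : Nat) : Int))) ++ '.' :: dt)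
     | none =>
        if PySem.Chars.isIn ['_'] cs then
          let lu := PySem.Chars.rfind cs ['_']
          String.ofList (PySem.List.slice cs none (some lu) ++ '.' :: PySem.List.slice cs (some (lu + 1)) none)
        else String.ofList cs) =
    (match pvRPart cs with
     | none => String.ofList cs
     | some (head, tail) =>
        if PySem.Set.contains pvDeviceTypeSet tail then
          String.ofList (head ++ '.' :: tail)
        else
          match pvRPart head with
          | some (head2, tail2) =>
              if PySem.Set.contains pvDeviceTypeSet (tail2 ++ '_' :: tail) then
                String.ofList (head2 ++ '.' :: tail2 ++ '_' :: tail)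
              else String.ofList (head ++ '.' :: tail)
          | none => String.ofList (head ++ '.' :: tail)) := by
  cases hr : pvRPart cs with
  | none =>
    -- no underscore at all: both sides return the input unchanged
    have hnu : '_' ∉ cs := (pvRPart_none_iff cs).mp hr
    have hA : pvAScan cs pvDeviceTypesA = none := by
      cases hA : pvAScan cs pvDeviceTypesA with
      | none => rfl
      | some dt =>
        obtain ⟨_, pre, hpre⟩ := pvAScan_some hA
        exact absurd (show '_' ∈ cs by rw [← hpre]; simp) hnu
    have hin : PySem.Chars.isIn ['_'] cs = false := by
      rw [PySem.Chars.isIn_eq_false_iff]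
      intro hinf
      obtain ⟨l, r, hlr⟩ := hinf
      exact hnu (by rw [← hlr]; simp)
    rw [hA, hin]
    simp
  | some p =>
    obtain ⟨h, t⟩ := p
    obtain ⟨hcs, hnt⟩ := pvRPart_some cs h t hr
    subst hcs
    simp only []
    by_cases hT : PySem.Set.contains pvDeviceTypeSet t = true
    · -- the last token is a known device type: both split at the last underscore
      simp only [pvAScan_eq h t ((pvMemSetIff t).mp hT), hT, if_true, pvASliceEq]
    · rw [Bool.not_eq_true] at hT
      simp only [hT, Bool.false_eq_true, if_false]
      cases hrh : pvRPart h with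
      | some q =>
        obtain ⟨h2, t2⟩ := q
        obtain ⟨hh, hnt2⟩ := pvRPart_some h h2 t2 hrh
        by_cases h2T : PySem.Set.contains pvDeviceTypeSet (t2 ++ '_' :: t) = true
        · -- the last two tokens form a known device type
          have hs2 : h ++ '_' :: t = h2 ++ '_' :: (t2 ++ '_' :: t) := by simp [hh]
          have hsc : pvAScan (h ++ '_' :: t) pvDeviceTypesA = some (t2 ++ '_' :: t) := by
            rw [hs2]; exact pvAScan_eq h2 _ ((pvMemSetIff _).mp h2T)
          have hsl : PySem.List.slice (h ++ '_' :: t) none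
              (some (-((('_' :: (t2 ++ '_' :: t)).length : Nat) : Int))) = h2 := by
            rw [hs2]; exact pvASliceEq h2 _
          simp only [hsc, h2T, if_true, hsl]
          simp
        · rw [Bool.not_eq_true] at h2T
          -- neither one nor two tokens match: A's scan finds nothing either
          have hA : pvAScan (h ++ '_' :: t) pvDeviceTypesA = none := by
            cases hA : pvAScan (h ++ '_' :: t) pvDeviceTypesA with
            | none => rfl
            | some dt =>
              obtain ⟨hdm, pre, hpre⟩ := pvAScan_some hA
              exfalso
              have hshape := pvTypeShape dt hdm
              cases hdt_r : pvRPart dt with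
              | none =>
                have hnd : '_' ∉ dt := (pvRPart_none_iff dt).mp hdt_r
                obtain ⟨_, hdt⟩ := pvRPartCancel hnd hnt hpre
                rw [hdt] at hdm
                rw [(pvMemSetIff t).mpr hdm] at hT
                exact absurd hT (by simp)
              | some q2 =>
                obtain ⟨d1, d2⟩ := q2
                obtain ⟨hdt, hnd2⟩ := pvRPart_some dt d1 d2 hdt_r
                rw [hdt_r] at hshape
                simp only [decide_eq_true_eq] at hshape
                have hpre2 : (pre ++ '_' :: d1) ++ '_' :: d2 = h ++ '_' :: t := by
                  rw [← hpre, hdt]; simp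
                obtain ⟨hph, hd2t⟩ := pvRPartCancel hnd2 hnt hpre2
                have : pvRPart h = some (pre, d1) := by
                  rw [← hph]; exact pvRPart_mk pre d1 hshape
                rw [hrh] at this
                simp only [Option.some.injEq, Prod.mk.injEq] at this
                have hmatch : t2 ++ '_' :: t = dt := by
                  rw [hdt, ← this.2, ← hd2t]
                rw [hmatch, (pvMemSetIff dt).mpr hdm] at h2T
                exact absurd h2T (by simp)
          simp only [hA, h2T, Bool.false_eq_true, if_false]
          exact pvFallback h t hnt
      | none =>
        -- the room part has no further underscore: single unknown token, fallback
        have hA : pvAScan (h ++ '_' :: t) pvDeviceTypesA = none := by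
          cases hA : pvAScan (h ++ '_' :: t) pvDeviceTypesA with
          | none => rfl
          | some dt =>
            obtain ⟨hdm, pre, hpre⟩ := pvAScan_some hA
            exfalso
            have hshape := pvTypeShape dt hdm
            cases hdt_r : pvRPart dt with
            | none =>
              have hnd : '_' ∉ dt := (pvRPart_none_iff dt).mp hdt_r
              obtain ⟨_, hdt⟩ := pvRPartCancel hnd hnt hpre
              rw [hdt] at hdm
              rw [(pvMemSetIff t).mpr hdm] at hT
              exact absurd hT (by simp)
            | some q2 =>
              obtain ⟨d1, d2⟩ := q2
              obtain ⟨hdt, hnd2⟩ := pvRPart_some dt d1 d2 hdt_r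
              rw [hdt_r] at hshape
              simp only [decide_eq_true_eq] at hshape
              have hpre2 : (pre ++ '_' :: d1) ++ '_' :: d2 = h ++ '_' :: t := by
                rw [← hpre, hdt]; simp
              obtain ⟨hph, _⟩ := pvRPartCancel hnd2 hnt hpre2
              have : pvRPart h = some (pre, d1) := by
                rw [← hph]; exact pvRPart_mk pre d1 hshape
              rw [hrh] at this
              exact absurd this (by simp)
        simp only [hA]
        exact pvFallback h t hnt

-- ===== VERDICT (by name: the statement is the Claim_ definition above) =====
theorem normalize_device_name_py_spec : Claim_equal_normalize_device_name_py := by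
  intro device_name _
  unfold Spec_normalize_device_name_py normalize_device_name_py normalize_device_name_py_alt
  simp only
  by_cases hd : PySem.Chars.isIn ['.'] device_name.toList = true
  · rw [if_pos hd, if_pos hd]
  · rw [if_neg hd, if_neg hd]
    have hmk : String.ofList device_name.toList = device_name := String.ofList_toList
    have h2 := pvMain device_name.toList
    rw [hmk] at h2
    exact h2
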